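-- pv_equiv track=rewrite | github.com/lightlayer-dev/agent-layer-python | src/agent_layer/mcp.py | parse_tool_name
-- ===== SOURCE A (Python) =====
-- def parse_tool_name(tool_name: str) -> dict[str, str]:
--     """Parse a tool name back into HTTP method and path.
--
--     Reverses format_tool_name: get_api_users → {"method": "GET", "path": "/api/users"}
--     """
--     parts = tool_name.split("_")
--     method = (parts[0] if parts else "get").upper()
--     path_parts = parts[1:]
--
--     segments: list[str] = []
--     i = 0
--     while i < len(path_parts):
--         if path_parts[i] == "by" and i + 1 < len(path_parts):
--             segments.append(f":{path_parts[i + 1]}")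
--             i += 2
--         else:
--             segments.append(path_parts[i])
--             i += 1
--
--     return {"method": method, "path": "/" + "/".join(segments)}
-- ===== SOURCE B (Python) =====
-- def parse_tool_name(tool_name: str) -> dict[str, str]:
--     """Parse a tool name back into HTTP method and path (string-rewriting version).
--
--     Instead of tokenizing, rewrite the raw string: every "_by_" marker becomes
--     "_:" (attaching the following token as a parameter), then every remaining
--     "_" becomes a path separator "/".
--     """
--     cut = tool_name.find("_")
--     head = tool_name if cut < 0 else tool_name[:cut]
--     tail = "" if cut < 0 else tool_name[cut:].replace("_by_", "_:").replace("_", "/")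
--     return {"method": head.upper(), "path": tail if tail else "/"}
-- ===== Notes on version B (the rewrite author's own statement) =====
-- stated objective: simpler
-- what changed: Replaced the split/index-walking tokenizer with lookahead by a direct string rewrite: cut off the method at the first '_', then rewrite every '_by_' marker to '_:' and every remaining '_' to '/' with two str.replace passes (no split, no join, no index loop).
import Mathlib
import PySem

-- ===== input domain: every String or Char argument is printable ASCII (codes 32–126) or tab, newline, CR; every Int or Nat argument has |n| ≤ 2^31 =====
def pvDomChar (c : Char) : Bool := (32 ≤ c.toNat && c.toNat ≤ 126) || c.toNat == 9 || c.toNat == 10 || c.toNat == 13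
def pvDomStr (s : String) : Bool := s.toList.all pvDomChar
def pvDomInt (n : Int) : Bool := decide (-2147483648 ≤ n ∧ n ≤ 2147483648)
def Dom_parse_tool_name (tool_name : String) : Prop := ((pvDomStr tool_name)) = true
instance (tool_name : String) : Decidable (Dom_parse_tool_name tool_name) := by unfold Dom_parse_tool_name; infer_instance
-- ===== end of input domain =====

-- B changes: no tokenizer — cut the method at the first '_', then two string replaces
-- ('_by_' → '_:', then '_' → '/') produce the path; objective: simpler.

-- ===== PORT A =====
-- A's while loop over path_parts with index i and the lookahead path_parts[i+1]:
-- the three cases (list exhausted; one element left, so i+1 < len fails; head plus lookahead).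
def pvSeg : List String → List String
  | [] => []
  | [p] => [p]
  | p :: x :: rest => if p == "by" then (":" ++ x) :: pvSeg rest else p :: pvSeg (x :: rest)

def parse_tool_name (tool_name : String) : List (String × String) :=
  -- parts = tool_name.split("_"); sep "_" ≠ "" so split? is always `some`
  let parts := (PySem.Str.split? tool_name "_").getD []
  -- method = (parts[0] if parts else "get").upper()
  let method := PySem.Str.upper (parts.headD "get")
  -- path_parts = parts[1:]
  let path_parts := PySem.List.slice parts (some 1) none
  let segments := pvSeg path_parts
  [("method", method), ("path", "/" ++ PySem.Str.join "/" segments)]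

-- ===== PORT B =====
def parse_tool_name_alt (tool_name : String) : List (String × String) :=
  let cut := PySem.Str.find tool_name "_"
  let head := if cut < 0 then tool_name else PySem.Str.slice tool_name none (some cut)
  let tail := if cut < 0 then "" else
    PySem.Str.replace (PySem.Str.replace (PySem.Str.slice tool_name (some cut) none) "_by_" "_:") "_" "/"
  [("method", PySem.Str.upper head), ("path", if tail = "" then "/" else tail)]

-- ===== PRECONDITION & SPEC =====
def Spec_parse_tool_name (tool_name : String) (out : List (String × String)) : Prop := out = parse_tool_name_alt tool_name
instance (tool_name : String) (out : List (String × String)) : Decidable (Spec_parse_tool_name tool_name out) := by unfold Spec_parse_tool_name; infer_instance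

-- ===== CLAIM (what is proved, stated in full; the proofs are below) =====
def Claim_equal_parse_tool_name : Prop := ∀ (tool_name : String), Dom_parse_tool_name tool_name → Spec_parse_tool_name tool_name (parse_tool_name tool_name)

-- ===== LEMMAS AND PROOFS =====

-- '_' ↦ '/', other chars unchanged
def pvSubst (c : Char) : Char := if c = '_' then '/' else c

-- clean recursive form of splitting on '_'
def pvSplitC : List Char → List (List Char)
  | [] => [[]]
  | c :: t => if c = '_' then [] :: pvSplitC t else
      match pvSplitC t with
      | u :: us => (c :: u) :: us
      | [] => [[c]]

-- char-level mirror of pvSeg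
def pvSegC : List (List Char) → List (List Char)
  | [] => []
  | [p] => [p]
  | p :: x :: rest => if p = ['b', 'y'] then (':' :: x) :: pvSegC rest else p :: pvSegC (x :: rest)

-- clean recursive form of replace · "_by_" "_:"
def pvR1 : List Char → List Char
  | [] => []
  | c :: t =>
    if ['_', 'b', 'y', '_'].isPrefixOf (c :: t) then '_' :: ':' :: pvR1 (List.drop 3 t)
    else c :: pvR1 t
termination_by l => l.length
decreasing_by all_goals (simp only [List.length_drop, List.length_cons]; omega)

def pvConsHead (x : List Char) : List (List Char) → List (List Char)
  | u :: us => (x ++ u) :: us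
  | [] => [x]

theorem pvR2_go (fuel : Nat) (l acc : List Char) (h : l.length ≤ fuel) :
    PySem.Chars.replace.go ['_'] ['/'] fuel l acc = acc.reverse ++ l.map pvSubst := by
  induction fuel generalizing l acc with
  | zero =>
    have hl : l = [] := List.eq_nil_of_length_eq_zero (Nat.le_zero.mp h)
    subst hl; simp [PySem.Chars.replace.go]
  | succ n ih =>
    cases l with
    | nil => simp [PySem.Chars.replace.go]
    | cons c t =>
      rw [PySem.Chars.replace.go]
      by_cases hc : c = '_'
      · subst hc
        have hp : ['_'].isPrefixOf ('_' :: t) = true := by simp [List.isPrefixOf]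
        simp only [hp, if_true]
        rw [show List.drop (['_'].length) ('_' :: t) = t from rfl]
        rw [ih t _ (by simpa using Nat.lt_succ_iff.mp (Nat.lt_of_lt_of_le (by simp) h))]
        simp [pvSubst]
      · have hp : ['_'].isPrefixOf (c :: t) = false := by
          simp [List.isPrefixOf, Ne.symm hc]
        simp only [hp, Bool.false_eq_true, if_false]
        rw [ih t _ (by simpa using Nat.lt_succ_iff.mp (Nat.lt_of_lt_of_le (by simp) h))]
        simp [pvSubst, hc]


theorem pvR2_eq (s : List Char) : PySem.Chars.replace s ['_'] ['/'] = s.map pvSubst := by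
  rw [PySem.Chars.replace]
  simp only [List.isEmpty_cons, Bool.false_eq_true, if_false]
  exact pvR2_go s.length s [] (le_refl _)


theorem pvR1_go (fuel : Nat) (l acc : List Char) (h : l.length ≤ fuel) :
    PySem.Chars.replace.go ['_', 'b', 'y', '_'] ['_', ':'] fuel l acc = acc.reverse ++ pvR1 l := by
  induction fuel generalizing l acc with
  | zero =>
    have hl : l = [] := List.eq_nil_of_length_eq_zero (Nat.le_zero.mp h)
    subst hl; simp [PySem.Chars.replace.go, pvR1]
  | succ n ih =>
    cases l with
    | nil => simp [PySem.Chars.replace.go, pvR1]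
    | cons c t =>
      rw [PySem.Chars.replace.go]
      have ht : t.length ≤ n := by simpa using h
      by_cases hp : ['_', 'b', 'y', '_'].isPrefixOf (c :: t) = true
      · simp only [hp, if_true]
        rw [show List.drop (['_', 'b', 'y', '_'].length) (c :: t) = List.drop 3 t from rfl]
        rw [ih (List.drop 3 t) _ (le_trans (by simp) ht)]
        have hr : pvR1 (c :: t) = '_' :: ':' :: pvR1 (List.drop 3 t) := by
          rw [pvR1]; simp [hp]
        simp [hr]
      · simp only [hp, Bool.false_eq_true, if_false]
        rw [ih t _ ht]
        have hr : pvR1 (c :: t) = c :: pvR1 t := by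
          rw [pvR1]; simp [hp]
        simp [hr]


theorem pvR1_eq (s : List Char) : PySem.Chars.replace s ['_', 'b', 'y', '_'] ['_', ':'] = pvR1 s := by
  rw [PySem.Chars.replace]
  simp only [List.isEmpty_cons, Bool.false_eq_true, if_false]
  exact pvR1_go s.length s [] (le_refl _)


theorem pvSplit_ne_nil (s : List Char) : pvSplitC s ≠ [] := by
  induction s with
  | nil => simp [pvSplitC]
  | cons c t ih =>
    rw [pvSplitC]
    by_cases hc : c = '_'
    · simp [hc]
    · simp only [hc, if_false]
      cases h' : pvSplitC t with
      | nil => simp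
      | cons u us => simp


theorem pvSplit_go (fuel : Nat) (l cur : List Char) (acc : List (List Char)) (h : l.length ≤ fuel) :
    PySem.Chars.splitOn.go ['_'] fuel l cur acc = acc.reverse ++ pvConsHead cur.reverse (pvSplitC l) := by
  induction fuel generalizing l cur acc with
  | zero =>
    have hl : l = [] := List.eq_nil_of_length_eq_zero (Nat.le_zero.mp h)
    subst hl; simp [PySem.Chars.splitOn.go, pvSplitC, pvConsHead]
  | succ n ih =>
    cases l with
    | nil => simp [PySem.Chars.splitOn.go, pvSplitC, pvConsHead]
    | cons c t =>
      rw [PySem.Chars.splitOn.go]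
      have ht : t.length ≤ n := by simpa using h
      obtain ⟨u, us, hu⟩ : ∃ u us, pvSplitC t = u :: us := by
        cases h' : pvSplitC t with
        | nil => exact absurd h' (pvSplit_ne_nil t)
        | cons u us => exact ⟨u, us, rfl⟩
      by_cases hc : c = '_'
      · subst hc
        have hp : ['_'].isPrefixOf ('_' :: t) = true := by simp [List.isPrefixOf]
        simp only [hp, if_true]
        rw [show List.drop (['_'].length) ('_' :: t) = t from rfl]
        rw [ih t [] _ ht]
        rw [pvSplitC]
        simp [pvConsHead, hu]
      · have hp : ['_'].isPrefixOf (c :: t) = false := by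
          simp [List.isPrefixOf, Ne.symm hc]
        simp only [hp, Bool.false_eq_true, if_false]
        rw [ih t (c :: cur) _ ht]
        rw [pvSplitC]
        simp [hc, pvConsHead, hu]


theorem pvSplit_eq (s : List Char) : PySem.Chars.splitOn s ['_'] = pvSplitC s := by
  rw [PySem.Chars.splitOn]
  rw [pvSplit_go (s.length + 1) s [] [] (by omega)]
  obtain ⟨u, us, hu⟩ : ∃ u us, pvSplitC s = u :: us := by
    cases h' : pvSplitC s with
    | nil => exact absurd h' (pvSplit_ne_nil s)
    | cons u us => exact ⟨u, us, rfl⟩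
  simp [hu, pvConsHead]


theorem pvSplit_no_us (s : List Char) : ∀ t ∈ pvSplitC s, '_' ∉ t := by
  induction s with
  | nil => simp [pvSplitC]
  | cons c t ih =>
    intro x hx
    rw [pvSplitC] at hx
    by_cases hc : c = '_'
    · simp only [hc, if_true] at hx
      rcases List.mem_cons.mp hx with h1 | h1
      · simp [h1]
      · exact ih x h1
    · simp only [hc, if_false] at hx
      cases h' : pvSplitC t with
      | nil => exact absurd h' (pvSplit_ne_nil t)
      | cons u us =>
        rw [h'] at hx
        rcases List.mem_cons.mp hx with h1 | h1
        · subst h1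
          intro hm
          rcases List.mem_cons.mp hm with hm | hm
          · exact hc hm.symm
          · exact ih u (by simp [h']) hm
        · exact ih x (by simp [h', h1])


theorem pvSplit_join (s : List Char) : PySem.Chars.join ['_'] (pvSplitC s) = s := by
  induction s with
  | nil => simp [pvSplitC, PySem.Chars.join_singleton]
  | cons c t ih =>
    rw [pvSplitC]
    obtain ⟨u, us, hu⟩ : ∃ u us, pvSplitC t = u :: us := by
      cases h' : pvSplitC t with
      | nil => exact absurd h' (pvSplit_ne_nil t)
      | cons u us => exact ⟨u, us, rfl⟩
    by_cases hc : c = '_'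
    · subst hc
      simp only [if_true]
      rw [hu, PySem.Chars.join_cons_cons]
      rw [hu] at ih
      simpa using ih
    · simp only [hc, if_false]
      rw [hu] at ih ⊢
      cases us with
      | nil =>
        rw [PySem.Chars.join_singleton] at ih ⊢
        simp [ih]
      | cons v vs =>
        rw [PySem.Chars.join_cons_cons] at ih ⊢
        simp [← ih]


theorem pvSplit_of_no_us (s : List Char) (h : '_' ∉ s) : pvSplitC s = [s] := by
  induction s with
  | nil => simp [pvSplitC]
  | cons c t ih =>
    rw [pvSplitC]
    have hc : ¬ c = '_' := fun h' => h (by simp [h'])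
    simp only [hc, if_false]
    rw [ih (fun h' => h (List.mem_cons_of_mem _ h'))]


theorem pvSplit_first (a b : List Char) (h : '_' ∉ a) : pvSplitC (a ++ '_' :: b) = a :: pvSplitC b := by
  induction a with
  | nil => simp [pvSplitC]
  | cons c a' ih =>
    have hc : ¬ c = '_' := fun h' => h (by simp [h'])
    rw [List.cons_append, pvSplitC]
    simp only [hc, if_false]
    rw [ih (fun h' => h (List.mem_cons_of_mem _ h'))]


theorem pvR1_skip (x r : List Char) (h : '_' ∉ x) : pvR1 (x ++ r) = x ++ pvR1 r := by
  induction x with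
  | nil => simp
  | cons c x' ih =>
    have hc : ¬ c = '_' := fun h' => h (by simp [h'])
    rw [List.cons_append, pvR1]
    have hp : ¬ (['_', 'b', 'y', '_'].isPrefixOf (c :: (x' ++ r)) = true) := by
      intro hp
      exact hc ((List.cons_prefix_cons.mp (List.isPrefixOf_iff_prefix.mp hp)).1.symm)
    rw [if_neg hp, ih (fun h' => h (List.mem_cons_of_mem _ h'))]
    simp


theorem pvSegC_ne_nil (ts : List (List Char)) (h : ts ≠ []) : pvSegC ts ≠ [] := by
  cases ts with
  | nil => exact absurd rfl h
  | cons p rest =>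
    cases rest with
    | nil => simp [pvSegC]
    | cons x rest' =>
      rw [pvSegC]
      by_cases hp : p = ['b', 'y'] <;> simp [hp]


theorem pvSegC_no_us (ts : List (List Char)) (h : ∀ t ∈ ts, '_' ∉ t) : ∀ t ∈ pvSegC ts, '_' ∉ t := by
  induction ts using pvSegC.induct with
  | case1 => simp [pvSegC]
  | case2 p => simpa [pvSegC] using h _ (by simp)
  | case3 x rest ih =>
    rw [pvSegC]
    rw [if_pos rfl]
    intro t ht
    rcases List.mem_cons.mp ht with ht | ht
    · subst ht
      intro hm
      rcases List.mem_cons.mp hm with hm | hm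
      · exact absurd hm.symm (by decide)
      · exact h x (by simp) hm
    · exact ih (fun u hu => h u (by simp [hu])) t ht
  | case4 p x rest hby ih =>
    rw [pvSegC]
    rw [if_neg hby]
    intro t ht
    rcases List.mem_cons.mp ht with ht | ht
    · exact ht ▸ h p (by simp)
    · refine ih (fun u hu => h u ?_) t ht
      rcases List.mem_cons.mp hu with hu | hu
      · simp [hu]
      · simp [hu]


-- the heart: the "_by_" → "_:" rewrite on '_' + '_'.join(ts) is A's pairing loop
theorem pvMain (ts : List (List Char)) (h : ∀ t ∈ ts, '_' ∉ t) :
    pvR1 ('_' :: PySem.Chars.join ['_'] ts) = '_' :: PySem.Chars.join ['_'] (pvSegC ts) := by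
  induction ts using pvSegC.induct with
  | case1 =>
    rw [pvSegC, PySem.Chars.join_nil, pvR1]
    norm_num [List.isPrefixOf]
    rw [pvR1]
  | case2 p =>
    simp only [pvSegC, PySem.Chars.join_singleton]
    rw [pvR1]
    have hp : ¬ (['_', 'b', 'y', '_'].isPrefixOf ('_' :: p) = true) := by
      intro hp
      have h2 : ['b', 'y', '_'] <+: p := (List.cons_prefix_cons.mp (List.isPrefixOf_iff_prefix.mp hp)).2
      exact h p (by simp) (h2.subset (by simp))
    rw [if_neg hp]
    have := pvR1_skip p [] (h p (by simp))
    simp only [List.append_nil, pvR1] at this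
    rw [this]
  | case3 x rest ih =>
    rw [pvSegC, if_pos rfl]
    rw [PySem.Chars.join_cons_cons]
    have hx : '_' ∉ x := h x (by simp)
    have hrest : ∀ t ∈ rest, '_' ∉ t := fun u hu => h u (by simp [hu])
    have hstep : '_' :: (['b', 'y'] ++ ['_'] ++ PySem.Chars.join ['_'] (x :: rest))
        = '_' :: 'b' :: 'y' :: '_' :: PySem.Chars.join ['_'] (x :: rest) := by simp
    rw [hstep, pvR1]
    rw [if_pos (by simp [List.isPrefixOf])]
    rw [show List.drop 3 ('b' :: 'y' :: '_' :: PySem.Chars.join ['_'] (x :: rest))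
        = PySem.Chars.join ['_'] (x :: rest) from rfl]
    cases rest with
    | nil =>
      rw [pvSegC, PySem.Chars.join_singleton, PySem.Chars.join_singleton]
      have := pvR1_skip x [] hx
      simp only [List.append_nil, pvR1] at this
      rw [this]
    | cons r0 r' =>
      rw [PySem.Chars.join_cons_cons]
      rw [show x ++ ['_'] ++ PySem.Chars.join ['_'] (r0 :: r')
          = x ++ ('_' :: PySem.Chars.join ['_'] (r0 :: r')) from by simp]
      rw [pvR1_skip x _ hx, ih hrest]
      obtain ⟨u, us, hu⟩ : ∃ u us, pvSegC (r0 :: r') = u :: us := by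
        cases h' : pvSegC (r0 :: r') with
        | nil => exact absurd h' (pvSegC_ne_nil _ (by simp))
        | cons u us => exact ⟨u, us, rfl⟩
      rw [hu, PySem.Chars.join_cons_cons]
      simp
  | case4 p x rest hby ih =>
    rw [pvSegC, if_neg hby]
    rw [PySem.Chars.join_cons_cons]
    have hp' : '_' ∉ p := h p (by simp)
    have hrest : ∀ t ∈ x :: rest, '_' ∉ t := fun u hu => by
      rcases List.mem_cons.mp hu with hu | hu
      · exact h u (by simp [hu])
      · exact h u (by simp [hu])
    have hstep : '_' :: (p ++ ['_'] ++ PySem.Chars.join ['_'] (x :: rest))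
        = '_' :: (p ++ '_' :: PySem.Chars.join ['_'] (x :: rest)) := by simp
    rw [hstep, pvR1]
    have hnp : ¬ (['_', 'b', 'y', '_'].isPrefixOf
        ('_' :: (p ++ '_' :: PySem.Chars.join ['_'] (x :: rest))) = true) := by
      intro hpre
      have h2 : ['b', 'y', '_'] <+: p ++ '_' :: PySem.Chars.join ['_'] (x :: rest) :=
        (List.cons_prefix_cons.mp (List.isPrefixOf_iff_prefix.mp hpre)).2
      rcases p with _ | ⟨c1, _ | ⟨c2, ps⟩⟩
      · rw [List.nil_append] at h2
        have hb := (List.cons_prefix_cons.mp h2).1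
        exact absurd hb (by decide)
      · rw [List.cons_append, List.nil_append] at h2
        have h3 := List.cons_prefix_cons.mp h2
        have hy := (List.cons_prefix_cons.mp h3.2).1
        exact absurd hy (by decide)
      · rw [List.cons_append, List.cons_append] at h2
        have h3 := List.cons_prefix_cons.mp h2
        have h4 := List.cons_prefix_cons.mp h3.2
        cases ps with
        | nil => exact hby (by rw [← h3.1, ← h4.1])
        | cons c3 ps' =>
          rw [List.cons_append] at h4
          have h5 := List.cons_prefix_cons.mp h4.2
          refine hp' ?_
          rw [h5.1]
          simp
    rw [if_neg hnp]
    rw [pvR1_skip p _ hp', ih hrest]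
    obtain ⟨u, us, hu⟩ : ∃ u us, pvSegC (x :: rest) = u :: us := by
      cases h' : pvSegC (x :: rest) with
      | nil => exact absurd h' (pvSegC_ne_nil _ (by simp))
      | cons u us => exact ⟨u, us, rfl⟩
    rw [hu, PySem.Chars.join_cons_cons]
    simp


theorem pvMapSubst (ts : List (List Char)) (h : ∀ t ∈ ts, '_' ∉ t) :
    (PySem.Chars.join ['_'] ts).map pvSubst = PySem.Chars.join ['/'] ts := by
  induction ts with
  | nil => simp [PySem.Chars.join_nil]
  | cons a r ih =>
    have ha : (a.map pvSubst) = a :=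
      (List.map_congr_left (fun c hc => by
        by_cases h' : c = '_'
        · exact absurd (h' ▸ hc) (h a (by simp))
        · simp [pvSubst, h'])).trans (List.map_id a)
    cases r with
    | nil => simpa [PySem.Chars.join_singleton] using ha
    | cons b r' =>
      rw [PySem.Chars.join_cons_cons, PySem.Chars.join_cons_cons]
      rw [List.map_append, List.map_append, ha, ih (fun u hu => h u (by simp [hu]))]
      simp [pvSubst]


theorem pvSeg_toList (ps : List String) :
    (pvSeg ps).map String.toList = pvSegC (ps.map String.toList) := by
  induction ps using pvSeg.induct with
  | case1 => simp [pvSeg, pvSegC]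
  | case2 p => simp [pvSeg, pvSegC]
  | case3 p x rest hby ih =>
    have hp : p = "by" := by simpa using hby
    subst hp
    rw [pvSeg, if_pos (by simp)]
    simp only [List.map_cons]
    rw [show String.toList "by" = ['b', 'y'] from rfl]
    rw [pvSegC, if_pos rfl]
    simp [ih]
  | case4 p x rest hby ih =>
    rw [pvSeg, if_neg hby]
    simp only [List.map_cons]
    rw [pvSegC, if_neg (by
      intro h'
      have : p = "by" := by
        rw [show ("by" : String) = String.ofList ['b', 'y'] from rfl, ← h', String.ofList_toList]
      exact hby (by simp [this]))]
    simp [ih]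

theorem pvInfix_singleton (c : Char) (t : List Char) : [c] <:+: t ↔ c ∈ t := by
  constructor
  · rintro ⟨a, b, rfl⟩; simp
  · intro hm; obtain ⟨a, b, rfl⟩ := List.append_of_mem hm; exact ⟨a, b, by simp⟩

theorem pvParts (s : String) :
    (PySem.Str.split? s "_").getD [] = (pvSplitC s.toList).map String.ofList := by
  simp [PySem.Str.split?, PySem.Chars.split?, pvSplit_eq]

-- ===== VERDICT (by name: the statement is the Claim_ definition above) =====
theorem parse_tool_name_spec : Claim_equal_parse_tool_name := by
  intro s _
  unfold Spec_parse_tool_name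
  by_cases hneg : PySem.Str.find s "_" < 0
  · -- no '_' in the string
    have hfind : PySem.Chars.find s.toList ['_'] = -1 := by
      have h1 := PySem.Chars.neg_one_le_find s.toList ['_']
      rw [PySem.Str.find_eq, show String.toList "_" = ['_'] from rfl] at hneg
      omega
    have hmem : '_' ∉ s.toList := fun hm =>
      (PySem.Chars.find_eq_neg_one_iff _ _).mp hfind ((pvInfix_singleton _ _).mpr hm)
    have hsp : pvSplitC s.toList = [s.toList] := pvSplit_of_no_us _ hmem
    simp only [parse_tool_name, parse_tool_name_alt, pvParts, hsp]
    rw [if_pos hneg, if_pos hneg]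
    simp only [List.map_cons, List.map_nil]
    rw [show PySem.List.slice [String.ofList s.toList] (some 1) none
        = List.drop 1 [String.ofList s.toList] from PySem.List.slice_from _ (by omega)]
    simp only [List.drop, List.headD, String.ofList_toList]
    rw [pvSeg]
    simp only [if_true]
    have hpath : ("/" : String) ++ PySem.Str.join "/" [] = "/" := by
      apply String.toList_inj.mp
      simp [String.toList_append, PySem.Str.toList_join, PySem.Chars.join_nil]
    rw [hpath]
  · -- the string contains '_' at first index k
    have h0 : 0 ≤ PySem.Chars.find s.toList ['_'] := by
      rw [PySem.Str.find_eq, show String.toList "_" = ['_'] from rfl] at hneg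
      omega
    obtain ⟨hpre, hmin⟩ := PySem.Chars.find_spec h0
    obtain ⟨r, hr⟩ := hpre
    have hdrop : List.drop (PySem.Chars.find s.toList ['_']).toNat s.toList = '_' :: r := by
      rw [← hr]; rfl
    have htake : '_' ∉ List.take (PySem.Chars.find s.toList ['_']).toNat s.toList := by
      intro hm
      obtain ⟨a, b, hab⟩ := List.append_of_mem hm
      have hlen : a.length < (PySem.Chars.find s.toList ['_']).toNat := by
        have h1 := congrArg List.length hab
        have h2 : (List.take (PySem.Chars.find s.toList ['_']).toNat s.toList).length
            ≤ (PySem.Chars.find s.toList ['_']).toNat := by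
          simp
        simp only [List.length_append, List.length_cons] at h1
        omega
      apply hmin a.length hlen
      have hs : s.toList = a ++ ('_' :: (b ++ List.drop (PySem.Chars.find s.toList ['_']).toNat s.toList)) := by
        conv_lhs => rw [← List.take_append_drop (PySem.Chars.find s.toList ['_']).toNat s.toList]
        rw [hab]
        simp
      rw [hs, List.drop_left]
      exact ⟨b ++ List.drop (PySem.Chars.find s.toList ['_']).toNat s.toList, rfl⟩
    have hsplit_s : s.toList
        = List.take (PySem.Chars.find s.toList ['_']).toNat s.toList ++ '_' :: r := by
      conv_lhs => rw [← List.take_append_drop (PySem.Chars.find s.toList ['_']).toNat s.toList]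
      rw [hdrop]
    have hsp : pvSplitC s.toList
        = List.take (PySem.Chars.find s.toList ['_']).toNat s.toList :: pvSplitC r := by
      conv_lhs => rw [hsplit_s]
      exact pvSplit_first _ _ htake
    -- B's tail, at the character level
    have htail : (PySem.Str.replace (PySem.Str.replace (PySem.Str.slice s
          (some (PySem.Str.find s "_")) none) "_by_" "_:") "_" "/").toList
        = '/' :: PySem.Chars.join ['/'] (pvSegC (pvSplitC r)) := by
      rw [PySem.Str.toList_replace, PySem.Str.toList_replace, PySem.Str.toList_slice]
      rw [show String.toList "_by_" = ['_', 'b', 'y', '_'] from rfl,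
        show String.toList "_:" = ['_', ':'] from rfl,
        show String.toList "_" = ['_'] from rfl,
        show String.toList "/" = ['/'] from rfl]
      rw [pvR1_eq, pvR2_eq]
      rw [PySem.Chars.slice_eq_listSlice, PySem.Str.find_eq,
        show String.toList "_" = ['_'] from rfl, PySem.List.slice_from _ h0, hdrop]
      conv_lhs => rw [show r = PySem.Chars.join ['_'] (pvSplitC r) from (pvSplit_join r).symm]
      rw [pvMain _ (pvSplit_no_us r)]
      rw [List.map_cons]
      rw [pvMapSubst _ (pvSegC_no_us _ (pvSplit_no_us r))]
      rfl
    have hne : (PySem.Str.replace (PySem.Str.replace (PySem.Str.slice s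
          (some (PySem.Str.find s "_")) none) "_by_" "_:") "_" "/") ≠ "" := by
      intro h'
      rw [h'] at htail
      exact absurd htail (by simp)
    simp only [parse_tool_name, parse_tool_name_alt, pvParts, hsp]
    rw [if_neg hneg, if_neg hneg, if_neg hne]
    rw [show PySem.List.slice (List.map String.ofList
          (List.take (PySem.Chars.find s.toList ['_']).toNat s.toList :: pvSplitC r)) (some 1) none
        = List.map String.ofList (pvSplitC r) from by
      rw [PySem.List.slice_from _ (by omega : (0 : Int) ≤ 1)]
      simp]
    apply congrArg₂ _ ?_ ?_
    · -- the "method" pair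
      apply congrArg₂ _ rfl
      apply String.toList_inj.mp
      rw [PySem.Str.toList_upper, PySem.Str.toList_upper, PySem.Str.toList_slice,
        PySem.Chars.slice_eq_listSlice, PySem.Str.find_eq,
        show String.toList "_" = ['_'] from rfl, PySem.List.slice_to _ h0]
      simp [String.toList_ofList]
    · -- the "path" pair
      apply congrArg₂ _ ?_ rfl
      apply congrArg₂ _ rfl
      apply String.toList_inj.mp
      rw [htail, String.toList_append, PySem.Str.toList_join]
      rw [pvSeg_toList]
      rw [show List.map String.toList (List.map String.ofList (pvSplitC r)) = pvSplitC r from by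
        simp [List.map_map, Function.comp_def, String.toList_ofList]]
      rfl
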